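-- pv_equiv track=rewrite | github.com/AlBi-HHU/covid-analysis | scripts/pangenome/call_variant.py | pos_of_diff
-- ===== SOURCE A (Python) =====
-- def pos_of_diff(path, reference):
--     begin = path[0]
--
--     try:
--         index_ref = reference.index(begin)
--     except ValueError:
--         index_ref = None
--
--     ref_set = set(reference)
--     for i_not_ref in (
--         index for (index, node) in enumerate(path) if node not in set(reference)
--     ):
--         begin_break = None
--         # found reference node before variant
--         for i in range(i_not_ref, 0, -1):
--             if path[i] in ref_set:
--                 begin_break = i
--                 break
--
--         # found reference node after variant
--         end_break = None
--         for i in range(i_not_ref, len(path)):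
--             if path[i] in ref_set:
--                 end_break = i
--                 break
--
--         if index_ref is None or begin_break is None or end_break is None:
--             yield None
--         else:
--             yield (begin_break, end_break + 1)
-- ===== SOURCE B (Python) =====
-- def pos_of_diff(path, reference):
--     ref_set = set(reference)
--     try:
--         index_ref = reference.index(path[0])
--     except ValueError:
--         index_ref = None
--     n = len(path)
--     # nearest reference index strictly before-or-at each position, never index 0
--     prev = []
--     last = None
--     for i, node in enumerate(path):
--         if i >= 1 and node in ref_set:
--             last = i
--         prev.append(last)
--     # nearest reference index at-or-after each position
--     nxt = [None] * n
--     last = None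
--     for i in range(n - 1, -1, -1):
--         if path[i] in ref_set:
--             last = i
--         nxt[i] = last
--     out = []
--     for node, p, nx in zip(path, prev, nxt):
--         if node not in ref_set:
--             if index_ref is None or p is None or nx is None:
--                 out.append(None)
--             else:
--                 out.append((p, nx + 1))
--     return out
-- ===== Notes on version B (the rewrite author's own statement) =====
-- stated objective: faster
-- what changed: A rescans the path backward and forward from every non-reference node (and rebuilds set(reference) per path element); B precomputes nearest-reference-before and nearest-reference-after arrays in two linear passes and answers each variant in O(1).
import Mathlib
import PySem

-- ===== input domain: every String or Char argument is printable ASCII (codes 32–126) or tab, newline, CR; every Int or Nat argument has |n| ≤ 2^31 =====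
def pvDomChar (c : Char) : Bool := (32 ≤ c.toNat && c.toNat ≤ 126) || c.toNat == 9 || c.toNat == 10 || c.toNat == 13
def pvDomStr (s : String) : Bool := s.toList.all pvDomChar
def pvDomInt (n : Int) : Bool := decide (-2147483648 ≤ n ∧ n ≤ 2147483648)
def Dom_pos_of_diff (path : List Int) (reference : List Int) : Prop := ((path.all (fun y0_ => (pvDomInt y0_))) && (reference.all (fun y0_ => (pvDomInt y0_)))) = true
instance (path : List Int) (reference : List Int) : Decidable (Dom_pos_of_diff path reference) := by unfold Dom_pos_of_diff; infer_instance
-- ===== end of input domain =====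

-- B replaces A's per-variant backward/forward scans (and its per-element set(reference) rebuild)
-- by two linear passes precomputing nearest-reference-before/after arrays; objective: faster (asymptotic).


-- ===== PORT A =====
-- `for i in range(i_not_ref, 0, -1): if path[i] in ref_set: begin_break = i; break`
-- as structural recursion on the loop counter; i is a valid non-negative index, so getD is exact.
def pvBackScan (path : List Int) (rs : PySem.Set Int) : Nat → Option Nat
  | 0 => none
  | k+1 => if rs.contains (path.getD (k+1) 0) then some (k+1) else pvBackScan path rs k

-- `for i in range(i_not_ref, len(path)): if path[i] in ref_set: end_break = i; break`
def pvFwdScan (path : List Int) (rs : PySem.Set Int) (i : Nat) : Option Nat :=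
  if i < path.length then
    if rs.contains (path.getD i 0) then some i else pvFwdScan path rs (i+1)
  else none
termination_by path.length - i

-- the body of A's outer loop: yield None or (begin_break, end_break + 1)
def pvAEntry (path : List Int) (rs : PySem.Set Int) (indexRef : Option Nat) (i : Nat) :
    Option (Int × Int) :=
  match indexRef, pvBackScan path rs i, pvFwdScan path rs i with
  | some _, some b, some e => some ((b : Int), (e : Int) + 1)
  | _, _, _ => none

def pos_of_diff (path : List Int) (reference : List Int) : List (Option (Int × Int)) :=
  match path with
  | [] => []  -- Python raises IndexError on path[0]; excluded by Pre_
  | b :: _ =>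
    let indexRef := PySem.List.index? reference b  -- try: reference.index(begin) except ValueError: None
    let rs := PySem.Set.ofList reference           -- ref_set = set(reference); the filter's set(reference) has the same membership
    (path.zipIdx).filterMap (fun p =>              -- generator over enumerate(path), keeping non-reference nodes
      if rs.contains p.1 then none else some (pvAEntry path rs indexRef p.2))

-- ===== PORT B =====
-- forward pass: prev[i] = nearest j with 1 <= j <= i and path[j] in ref_set, carried in `last`
def pvPrev (rs : PySem.Set Int) : List Int → Nat → Option Nat → List (Option Nat)
  | [], _, _ => []
  | x :: xs, i, last =>
    let last' := if decide (1 ≤ i) && rs.contains x then some i else last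
    last' :: pvPrev rs xs (i+1) last'

-- backward pass: nxt[i] = nearest j >= i with path[j] in ref_set; `last` of the loop is the head of the tail's list
def pvNext (rs : PySem.Set Int) : List Int → Nat → List (Option Nat)
  | [], _ => []
  | x :: xs, i =>
    let rest := pvNext rs xs (i+1)
    (if rs.contains x then some i else rest.headD none) :: rest

-- final pass over zip(path, prev, nxt)
def pvOut (rs : PySem.Set Int) (indexRef : Option Nat) :
    List Int → List (Option Nat) → List (Option Nat) → List (Option (Int × Int))
  | x :: xs, p :: ps, nx :: ns =>
    if rs.contains x then pvOut rs indexRef xs ps ns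
    else (match indexRef, p, nx with
          | some _, some a, some e => some ((a : Int), (e : Int) + 1)
          | _, _, _ => none) :: pvOut rs indexRef xs ps ns
  | _, _, _ => []

def pos_of_diff_alt (path : List Int) (reference : List Int) : List (Option (Int × Int)) :=
  match path with
  | [] => []  -- Python raises IndexError on path[0]; excluded by Pre_
  | b :: _ =>
    let rs := PySem.Set.ofList reference
    let indexRef := PySem.List.index? reference b
    pvOut rs indexRef path (pvPrev rs path 0 none) (pvNext rs path 0)

-- ===== PRECONDITION & SPEC =====
-- A evaluates path[0] and raises IndexError on an empty path; Pre_ excludes only that.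
def Pre_pos_of_diff (path : List Int) (reference : List Int) : Prop := path ≠ []
instance (path : List Int) (reference : List Int) : Decidable (Pre_pos_of_diff path reference) := by unfold Pre_pos_of_diff; infer_instance
def pvWitness_pos_of_diff : List Int × List Int := ([1, 5, 2, 1], [1, 2, 3])

def Spec_pos_of_diff (path : List Int) (reference : List Int) (out : List (Option (Int × Int))) : Prop := out = pos_of_diff_alt path reference
instance (path : List Int) (reference : List Int) (out : List (Option (Int × Int))) : Decidable (Spec_pos_of_diff path reference out) := by unfold Spec_pos_of_diff; infer_instance

-- ===== CLAIM (what is proved, stated in full; the proofs are below) =====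
def Claim_equal_pos_of_diff : Prop := ∀ (path : List Int) (reference : List Int), Dom_pos_of_diff path reference → Pre_pos_of_diff path reference → Spec_pos_of_diff path reference (pos_of_diff path reference)

-- ===== LEMMAS AND PROOFS =====

-- facts about the element of `path` at index i, from `path.drop i = x :: xs`
lemma pvDrop_getElem? (path xs : List Int) (x : Int) (i : Nat) (h : path.drop i = x :: xs) :
    path[i]? = some x := by
  have h0 : (path.drop i)[0]? = path[i+0]? := List.getElem?_drop
  rw [h] at h0
  simpa using h0.symm

lemma pvDrop_succ (path xs : List Int) (x : Int) (i : Nat) (h : path.drop i = x :: xs) :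
    path.drop (i+1) = xs := by
  have ht : (path.drop i).tail = path.drop (i+1) := List.tail_drop
  rw [h] at ht
  simpa using ht.symm

-- the head of B's backward-pass list starting at i is exactly A's forward scan from i
lemma pvNext_headD (path : List Int) (rs : PySem.Set Int) :
    ∀ (xs : List Int) (i : Nat), path.drop i = xs →
      (pvNext rs xs i).headD none = pvFwdScan path rs i := by
  intro xs
  induction xs with
  | nil =>
    intro i h
    have hlen : path.length ≤ i := by
      by_contra hc
      have := List.drop_eq_nil_iff.mp h
      omega
    rw [pvFwdScan, if_neg (Nat.not_lt.mpr hlen)]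
    rfl
  | cons x xs ih =>
    intro i h
    have hx : path[i]? = some x := pvDrop_getElem? path xs x i h
    have hi : i < path.length := (List.getElem?_eq_some_iff.mp hx).1
    have hget : path.getD i 0 = x := by
      rw [List.getD_eq_getElem?_getD, hx]; rfl
    rw [pvFwdScan, if_pos hi, hget]
    show (if rs.contains x then some i else (pvNext rs xs (i+1)).headD none)
        = if rs.contains x then some i else pvFwdScan path rs (i+1)
    rw [ih (i+1) (pvDrop_succ path xs x i h)]

-- main invariant: processing the suffix of `path` from index i, with `last` holding A's
-- backward-scan result from below i, the two loop shapes produce the same output list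
lemma pvMain (path : List Int) (rs : PySem.Set Int) (ir : Option Nat) :
    ∀ (xs : List Int) (i : Nat) (last : Option Nat), path.drop i = xs →
      last = pvBackScan path rs (i - 1) →
      (xs.zipIdx i).filterMap (fun p =>
          if rs.contains p.1 then none else some (pvAEntry path rs ir p.2))
        = pvOut rs ir xs (pvPrev rs xs i last) (pvNext rs xs i) := by
  intro xs
  induction xs with
  | nil => intro i last _ _; rfl
  | cons x xs ih =>
    intro i last h hlast
    have hx : path[i]? = some x := pvDrop_getElem? path xs x i h
    have hi : i < path.length := (List.getElem?_eq_some_iff.mp hx).1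
    have hget : path.getD i 0 = x := by
      rw [List.getD_eq_getElem?_getD, hx]; rfl
    have hdrop : path.drop (i+1) = xs := pvDrop_succ path xs x i h
    -- the carried value after this step is A's backward scan from i
    have hlast' :
        (if decide (1 ≤ i) && rs.contains x then some i else last) = pvBackScan path rs i := by
      cases i with
      | zero => simpa [pvBackScan] using hlast
      | succ k =>
        have e : pvBackScan path rs (k+1)
            = if rs.contains x then some (k+1) else pvBackScan path rs k := by
          rw [pvBackScan, hget]
        rw [e]
        cases hc : rs.contains x with
        | true => simp
        | false => simpa using hlast
    rw [List.zipIdx_cons]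
    cases hc : rs.contains x with
    | true =>
      have hf : (fun p => if rs.contains p.1 then none
            else some (pvAEntry path rs ir p.2)) ((x, i) : Int × Nat) = none := by
        show (if rs.contains x then none else some (pvAEntry path rs ir i)) = none
        rw [hc]; rfl
      simp only [List.filterMap_cons, hf]
      simp only [pvPrev, pvNext, pvOut, hc, Bool.and_true, if_true]
      exact ih (i+1) _ hdrop (by rw [Nat.add_sub_cancel, ← hlast', hc, Bool.and_true])
    | false =>
      have hf : (fun p => if rs.contains p.1 then none
            else some (pvAEntry path rs ir p.2)) ((x, i) : Int × Nat)
          = some (pvAEntry path rs ir i) := by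
        show (if rs.contains x then none else some (pvAEntry path rs ir i)) = _
        rw [hc]; rfl
      simp only [List.filterMap_cons, hf]
      simp only [pvPrev, pvNext, pvOut, hc, Bool.and_false, Bool.false_eq_true, if_false]
      have hback : pvBackScan path rs i = last := by
        rw [← hlast', hc, Bool.and_false]; rfl
      have hfwd : pvFwdScan path rs i = (pvNext rs xs (i+1)).headD none := by
        rw [pvFwdScan, if_pos hi, hget, hc]
        simp only [Bool.false_eq_true, if_false]
        exact (pvNext_headD path rs xs (i+1) hdrop).symm
      rw [ih (i+1) last hdrop (by rw [Nat.add_sub_cancel]; exact hback.symm)]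
      congr 1
      unfold pvAEntry
      rw [hback, hfwd]

-- ===== VERDICT (by name: the statement is the Claim_ definition above) =====
theorem pos_of_diff_spec : Claim_equal_pos_of_diff := by
  intro path reference _ hpre
  unfold Spec_pos_of_diff pos_of_diff pos_of_diff_alt
  match path, hpre with
  | b :: rest, _ =>
    exact pvMain (b :: rest) (PySem.Set.ofList reference) (PySem.List.index? reference b)
      (b :: rest) 0 none rfl rfl
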